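-- pv_equiv track=rewrite | github.com/unclefish7/drone-dataset | utils/frame_correction.py | find_optimal_base
-- ===== SOURCE A (Python) =====
-- from typing import Dict, List, Optional, Tuple
--
-- MAX_CORRECTION_RANGE = 2  # 最大帧号差值
--
-- def find_optimal_base(current: int, base_frames: List[int]) -> Optional[int]:
--     """寻找最近的合法基准帧（差值在2以内）"""
--     candidates = []
--     for bf in base_frames:
--         delta = abs(bf - current)
--         if delta <= MAX_CORRECTION_RANGE:
--             candidates.append((delta, bf))
--
--     if not candidates:
--         return None
--
--     # 优先选择差值最小的，差值相同选择较小的帧号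
--     candidates.sort()
--     return candidates[0][1]
-- ===== SOURCE B (Python) =====
-- MAX_CORRECTION_RANGE = 2
--
-- def find_optimal_base(current, base_frames):
--     """Single pass tracking the running (delta, frame) minimum; no list, no sort."""
--     best = None
--     for bf in base_frames:
--         delta = abs(bf - current)
--         if delta > MAX_CORRECTION_RANGE:
--             continue
--         if best is None or (delta, bf) < best:
--             best = (delta, bf)
--     return None if best is None else best[1]
-- ===== Notes on version B (the rewrite author's own statement) =====
-- stated objective: simpler
-- what changed: Replaces building a candidates list and sorting it with a single linear pass that maintains the running lexicographic minimum (delta, frame).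
import Mathlib
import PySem

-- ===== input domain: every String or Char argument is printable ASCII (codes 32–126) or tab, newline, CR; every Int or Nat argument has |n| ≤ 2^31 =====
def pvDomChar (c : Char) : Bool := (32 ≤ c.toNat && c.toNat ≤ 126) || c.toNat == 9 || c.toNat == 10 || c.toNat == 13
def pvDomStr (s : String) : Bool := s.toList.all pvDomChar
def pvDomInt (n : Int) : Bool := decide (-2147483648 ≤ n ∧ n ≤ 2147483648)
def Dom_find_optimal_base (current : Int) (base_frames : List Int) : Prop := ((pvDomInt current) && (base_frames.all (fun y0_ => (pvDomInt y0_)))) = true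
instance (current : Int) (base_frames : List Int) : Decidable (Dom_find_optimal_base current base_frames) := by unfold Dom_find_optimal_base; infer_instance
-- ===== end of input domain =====

-- B replaces A's collect-then-sort with a single pass keeping the running (delta, frame) minimum; same result, simpler.

-- ===== PORT A =====
def find_optimal_base (current : Int) (base_frames : List Int) : Option Int :=
  let candidates : List (Int × Int) :=
    base_frames.foldl (fun acc bf =>
      let delta := |bf - current|
      if delta ≤ 2 then acc ++ [(delta, bf)] else acc) []
  if candidates = [] then none
  else ((PySem.List.sorted2 candidates (fun p => p.1) (fun p => p.2)).head?).map (fun p => p.2)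

-- ===== PORT B =====
def altStep (current : Int) (best : Option (Int × Int)) (bf : Int) : Option (Int × Int) :=
  let delta := |bf - current|
  if delta > 2 then best
  else
    match best with
    | none => some (delta, bf)
    | some b => if delta < b.1 ∨ (delta = b.1 ∧ bf < b.2) then some (delta, bf) else some b

def find_optimal_base_alt (current : Int) (base_frames : List Int) : Option Int :=
  (base_frames.foldl (altStep current) none).map (fun b => b.2)

-- ===== PRECONDITION & SPEC =====
def Spec_find_optimal_base (current : Int) (base_frames : List Int) (out : Option Int) : Prop := out = find_optimal_base_alt current base_frames
instance (current : Int) (base_frames : List Int) (out : Option Int) : Decidable (Spec_find_optimal_base current base_frames out) := by unfold Spec_find_optimal_base; infer_instance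

-- ===== CLAIM (what is proved, stated in full; the proofs are below) =====
def Claim_equal_find_optimal_base : Prop := ∀ (current : Int) (base_frames : List Int), Dom_find_optimal_base current base_frames → Spec_find_optimal_base current base_frames (find_optimal_base current base_frames)

-- ===== LEMMAS AND PROOFS =====

-- the "before" relation sorted2 uses for key (p.1, p.2)
def pvBefore (a b : Int × Int) : Bool :=
  decide (a.1 < b.1) || (!decide (b.1 < a.1) && decide (a.2 < b.2))

-- head evolution of one insertBy step
def pvHStep (h : Option (Int × Int)) (x : Int × Int) : Option (Int × Int) :=
  some (match h with | none => x | some y => if pvBefore x y then x else y)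

lemma head_insertBy (x : Int × Int) (acc : List (Int × Int)) :
    (PySem.List.insertBy pvBefore x acc).head? = pvHStep acc.head? x := by
  cases acc with
  | nil => rfl
  | cons y ys =>
    simp only [PySem.List.insertBy, pvHStep, List.head?]
    split_ifs <;> rfl

lemma head_foldl_insertBy (cs : List (Int × Int)) :
    ∀ acc : List (Int × Int),
      (cs.foldl (fun a x => PySem.List.insertBy pvBefore x a) acc).head?
        = cs.foldl pvHStep acc.head? := by
  induction cs with
  | nil => intro acc; rfl
  | cons c t ih =>
    intro acc
    simp only [List.foldl_cons]
    rw [ih, head_insertBy]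

lemma hstep_eq_min (h : Option (Int × Int)) (x : Int × Int) :
    pvHStep h x =
      (match h with
       | none => some x
       | some b => if x.1 < b.1 ∨ (x.1 = b.1 ∧ x.2 < b.2) then some x else some b) := by
  cases h with
  | none => rfl
  | some b =>
    simp only [pvHStep, pvBefore]
    by_cases h1 : x.1 < b.1 ∨ (x.1 = b.1 ∧ x.2 < b.2)
    · have : (decide (x.1 < b.1) || (!decide (b.1 < x.1) && decide (x.2 < b.2))) = true := by
        rcases h1 with h1 | ⟨h1, h2⟩ <;> simp <;> omega
      simp [this, h1]
    · have : (decide (x.1 < b.1) || (!decide (b.1 < x.1) && decide (x.2 < b.2))) = false := by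
        push Not at h1
        simp only [Bool.or_eq_false_iff, Bool.and_eq_false_iff, decide_eq_false_iff_not,
          Bool.not_eq_false', decide_eq_true_eq]
        omega
      simp [this, h1]

-- both folds, run over base_frames, maintain the same head/best state
lemma folds_agree (current : Int) (l : List Int) :
    ∀ acc : List (Int × Int),
      ((l.foldl (fun acc bf =>
          let delta := |bf - current|
          if delta ≤ 2 then acc ++ [(delta, bf)] else acc) acc).foldl
            (fun a x => PySem.List.insertBy pvBefore x a) []).head?
        = l.foldl (altStep current)
            ((acc.foldl (fun a x => PySem.List.insertBy pvBefore x a) []).head?) := by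
  induction l with
  | nil => intro acc; rfl
  | cons bf t ih =>
    intro acc
    simp only [List.foldl_cons]
    by_cases hd : |bf - current| ≤ 2
    · rw [if_pos hd, ih]
      congr 1
      rw [head_foldl_insertBy, head_foldl_insertBy, List.foldl_append]
      simp only [List.foldl_cons, List.foldl_nil]
      rw [hstep_eq_min]
      simp only [altStep]
      rw [if_neg (by omega)]
    · rw [if_neg hd, ih]
      congr 1
      simp only [altStep]
      rw [if_pos (by omega)]

-- ===== VERDICT (by name: the statement is the Claim_ definition above) =====
theorem find_optimal_base_spec : Claim_equal_find_optimal_base := by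
  intro current base_frames _
  unfold Spec_find_optimal_base find_optimal_base find_optimal_base_alt
  simp only []
  set cands := base_frames.foldl (fun acc bf =>
      let delta := |bf - current|
      if delta ≤ 2 then acc ++ [(delta, bf)] else acc) ([] : List (Int × Int)) with hc
  have hmain : (PySem.List.sorted2 cands (fun p => p.1) (fun p => p.2)).head?
      = base_frames.foldl (altStep current) none := by
    have hs : PySem.List.sorted2 cands (fun p => p.1) (fun p => p.2)
        = cands.foldl (fun a x => PySem.List.insertBy pvBefore x a) [] := by
      simp only [PySem.List.sorted2]
      rfl
    rw [hs, hc]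
    have := folds_agree current base_frames []
    simpa using this
  by_cases hnil : cands = []
  · rw [if_pos hnil]
    have : base_frames.foldl (altStep current) none = none := by
      rw [← hmain, hnil]; rfl
    rw [this]; rfl
  · rw [if_neg hnil, hmain]
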